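-- pv_equiv track=rewrite | github.com/possomartin/GameStatBuilder | api/Python/Calculator.py | manual_func
-- ===== SOURCE A (Python) =====
-- def manual_func(data):
--   lookup = {}
--   result = []
--
--   for element in data:
--     if element[2] not in lookup:
--       target = lookup[element[2]] = [element]
--       result.append(target)
--     else:
--       lookup[element[2]].append(element)
--   return result
-- ===== SOURCE B (Python) =====
-- def manual_func(data):
--   keys = list(dict.fromkeys(element[2] for element in data))
--   return [[element for element in data if element[2] == k] for k in keys]
-- ===== Notes on version B (the rewrite author's own statement) =====
-- stated objective: simpler
-- what changed: Replaces the interleaved dict-lookup + aliased result-list bookkeeping with two separate comprehensions: an ordered dedup of the third fields, then one filter of the data per key.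
import Mathlib
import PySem

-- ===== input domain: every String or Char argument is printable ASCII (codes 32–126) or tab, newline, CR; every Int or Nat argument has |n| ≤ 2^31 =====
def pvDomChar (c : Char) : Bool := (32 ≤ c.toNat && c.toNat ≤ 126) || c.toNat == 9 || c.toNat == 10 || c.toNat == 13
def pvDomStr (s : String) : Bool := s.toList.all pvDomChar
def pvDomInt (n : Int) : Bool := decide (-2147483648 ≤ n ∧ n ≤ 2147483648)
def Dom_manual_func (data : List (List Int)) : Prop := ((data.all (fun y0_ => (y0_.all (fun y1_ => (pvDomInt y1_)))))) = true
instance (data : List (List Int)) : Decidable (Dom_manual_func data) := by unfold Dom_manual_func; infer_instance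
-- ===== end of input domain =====

-- B groups by the third field with two separate comprehensions (ordered key dedup, then one
-- filter per key) instead of A's interleaved dict lookup + aliased result-list bookkeeping;
-- same return value (A returns the dict's lists aliased, modeled here by their values).

-- ===== PORT A =====
-- element[2]; inside Pre_ the index is always in range
def pvKeyA (e : List Int) : Int := (PySem.List.pyGet? e 2).getD 0

-- A appends each new group list to both `lookup` and `result`; later appends mutate the shared
-- list objects, so the returned `result` is exactly `lookup`'s values in insertion order,
-- which is how the aliasing is modeled here.
def manual_func (data : List (List Int)) : List (List (List Int)) :=
  (data.foldl
    (fun lookup element =>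
      let k := pvKeyA element
      if lookup.contains k then lookup.insert k (lookup.getD k [] ++ [element])
      else lookup.insert k [element])
    PySem.Dict.empty).values

-- ===== PORT B =====
def pvKeyB (e : List Int) : Int := (PySem.List.pyGet? e 2).getD 0

def manual_func_alt (data : List (List Int)) : List (List (List Int)) :=
  (PySem.List.dedup (data.map pvKeyB)).map
    (fun k => data.filter (fun e => pvKeyB e == k))

-- ===== PRECONDITION & SPEC =====
-- Pre_ excludes exactly the inputs on which A raises IndexError: an inner list shorter than 3.
def Pre_manual_func (data : List (List Int)) : Prop := ∀ e ∈ data, 3 ≤ e.length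
instance (data : List (List Int)) : Decidable (Pre_manual_func data) := by
  unfold Pre_manual_func; infer_instance
def pvWitness_manual_func : List (List Int) := [[1, 2, 3], [4, 5, 3], [7, 8, 9]]

def Spec_manual_func (data : List (List Int)) (out : List (List (List Int))) : Prop := out = manual_func_alt data
instance (data : List (List Int)) (out : List (List (List Int))) : Decidable (Spec_manual_func data out) := by unfold Spec_manual_func; infer_instance

-- ===== CLAIM (what is proved, stated in full; the proofs are below) =====
def Claim_equal_manual_func : Prop := ∀ (data : List (List Int)), Dom_manual_func data → Pre_manual_func data → Spec_manual_func data (manual_func data)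

-- ===== LEMMAS AND PROOFS =====

-- A's loop body is exactly `lookup[k] = lookup.get(k, []) + [element]`
theorem pv_step_eq_modify (d : PySem.Dict Int (List (List Int))) (e : List Int) :
    (if d.contains (pvKeyA e) then d.insert (pvKeyA e) (d.getD (pvKeyA e) [] ++ [e])
     else d.insert (pvKeyA e) [e]) = d.modify (pvKeyA e) [] (· ++ [e]) := by
  by_cases h : d.contains (pvKeyA e)
  · simp [h, PySem.Dict.modify]
  · simp [h, PySem.Dict.modify,
      PySem.Dict.getD_of_not_contains d ([] : List (List Int)) (by simpa using h)]

theorem pv_dict_eq (data : List (List Int)) :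
    data.foldl
      (fun lookup element =>
        let k := pvKeyA element
        if lookup.contains k then lookup.insert k (lookup.getD k [] ++ [element])
        else lookup.insert k [element])
      PySem.Dict.empty
    = (data.map (fun e => (pvKeyA e, e))).foldl
        (fun d p => d.modify p.1 [] (· ++ [p.2])) PySem.Dict.empty := by
  rw [List.foldl_map]
  exact (PySem.List.foldl_congr_mem data _ _ _ (fun d e _ => (pv_step_eq_modify d e).symm)).symm

theorem manual_func_spec_aux (data : List (List Int)) :
    manual_func data = manual_func_alt data := by
  unfold manual_func manual_func_alt
  rw [pv_dict_eq]
  set D := (data.map (fun e => (pvKeyA e, e))).foldl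
      (fun d p => d.modify p.1 [] (· ++ [p.2])) PySem.Dict.empty with hD
  have hnd : D.keys.Nodup := by
    rw [hD]
    have := PySem.Dict.nodup_keys_foldl_modify_key
      (l := data.map (fun e => (pvKeyA e, e))) (key := fun p => p.1) (d0 := [])
      (f := fun _ p => (· ++ [p.2])) (d := PySem.Dict.empty) (by simp)
    simpa using this
  have hkeys : D.keys = PySem.List.dedup (data.map pvKeyB) := by
    rw [hD]
    have := PySem.Dict.keys_foldl_modify_key
      (l := data.map (fun e => (pvKeyA e, e))) (key := fun p => p.1) (d0 := [])
      (f := fun _ p => (· ++ [p.2])) (d := PySem.Dict.empty)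
    simp only [this, PySem.Dict.keys_empty, List.map_map]
    rw [PySem.Set.update_nil_left]
    rfl
  have hget : ∀ k, D.getD k [] = data.filter (fun e => pvKeyB e == k) := by
    intro k
    rw [hD, PySem.Dict.getD_foldl_modify_append]
    simp [List.filter_map, List.map_map, pvKeyA, pvKeyB, Function.comp_def]
  rw [PySem.Dict.values_eq_map_keys D hnd [], hkeys]
  exact List.map_congr_left (fun k _ => hget k)

-- ===== VERDICT (by name: the statement is the Claim_ definition above) =====
theorem manual_func_spec : Claim_equal_manual_func := by
  intro data _ _
  exact manual_func_spec_aux data
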